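-- pv_equiv track=rewrite | github.com/lifecycles1/competitive-programming | codesignal/arcade/2.core/9.well of integration/8.timedReading.py | timedReading
-- ===== SOURCE A (Python) =====
-- import string
--
-- def timedReading(maxLength, text):
--     # 1. Replace non-alphabetic characters with spaces
--     filtered_text = ""
--     for i in text:
--         if i in string.ascii_letters:
--             filtered_text += i
--         else:
--             filtered_text += " "
--
--     # 2. Split the filtered text into words
--     words = filtered_text.split()
--
--     # 3. Count the number of words that are shorter than or equal to maxLength
--     count = 0
--     for j in words:
--         if len(j) <= maxLength:
--             count += 1
--
--     # 4. Return the count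
--     return count
-- ===== SOURCE B (Python) =====
-- import string
--
-- def timedReading(maxLength, text):
--     # single pass: maintain the length of the current run of letters
--     count = 0
--     cur = 0
--     for ch in text:
--         if ch in string.ascii_letters:
--             cur += 1
--         else:
--             if cur > 0:
--                 if cur <= maxLength:
--                     count += 1
--                 cur = 0
--     if cur > 0 and cur <= maxLength:
--         count += 1
--     return count
-- ===== Notes on version B (the rewrite author's own statement) =====
-- stated objective: simpler
-- what changed: Replaces the build-filtered-string / split / count-words pipeline with one pass over text that keeps a running length of the current letter run and counts a run when it ends with length <= maxLength.
import Mathlib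
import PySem

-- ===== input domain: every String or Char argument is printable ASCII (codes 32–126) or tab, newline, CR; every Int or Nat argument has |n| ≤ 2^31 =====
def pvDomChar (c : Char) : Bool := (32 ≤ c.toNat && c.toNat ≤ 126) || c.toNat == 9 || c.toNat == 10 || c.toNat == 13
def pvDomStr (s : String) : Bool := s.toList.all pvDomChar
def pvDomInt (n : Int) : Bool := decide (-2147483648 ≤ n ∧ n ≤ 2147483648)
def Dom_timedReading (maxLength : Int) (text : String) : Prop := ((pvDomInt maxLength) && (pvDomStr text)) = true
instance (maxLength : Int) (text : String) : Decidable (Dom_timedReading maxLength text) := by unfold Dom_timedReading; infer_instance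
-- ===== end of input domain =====

-- B replaces A's build-filtered-string/split/count pipeline with a single pass keeping the current letter-run length (simpler; same O(n) cost).

-- `c in string.ascii_letters` (used by both Pythons)
def pvLetter (c : Char) : Bool := ('a' ≤ c && c ≤ 'z') || ('A' ≤ c && c ≤ 'Z')

-- ===== PORT A =====
def timedReading (maxLength : Int) (text : String) : Int :=
  -- 1. replace non-letters by spaces (string concat → fold appending chars)
  let filtered : List Char :=
    text.toList.foldl (fun acc c => if pvLetter c then acc ++ [c] else acc ++ [' ']) []
  -- 2. split on whitespace
  let words := PySem.Chars.split₀ filtered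
  -- 3. count words of length ≤ maxLength
  words.foldl (fun count w => if (w.length : Int) ≤ maxLength then count + 1 else count) 0

-- ===== PORT B =====
def timedReading_alt (maxLength : Int) (text : String) : Int :=
  let s :=
    text.toList.foldl
      (fun (s : Int × Int) c =>
        if pvLetter c then (s.1, s.2 + 1)
        else if s.2 > 0 then (if s.2 ≤ maxLength then s.1 + 1 else s.1, 0) else s) (0, 0)
  if s.2 > 0 && s.2 ≤ maxLength then s.1 + 1 else s.1

-- ===== PRECONDITION & SPEC =====
def Spec_timedReading (maxLength : Int) (text : String) (out : Int) : Prop := out = timedReading_alt maxLength text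
instance (maxLength : Int) (text : String) (out : Int) : Decidable (Spec_timedReading maxLength text out) := by unfold Spec_timedReading; infer_instance

-- ===== CLAIM (what is proved, stated in full; the proofs are below) =====
def Claim_equal_timedReading : Prop := ∀ (maxLength : Int) (text : String), Dom_timedReading maxLength text → Spec_timedReading maxLength text (timedReading maxLength text)

-- ===== LEMMAS AND PROOFS =====

-- reference: count of letter runs of length ≤ maxLength, with current run length r
def refGo (maxLength : Int) (r : Nat) : List Char → Int
  | [] => if 0 < r ∧ (r : Int) ≤ maxLength then 1 else 0
  | c :: cs =>
    if pvLetter c then refGo maxLength (r + 1) cs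
    else (if 0 < r ∧ (r : Int) ≤ maxLength then 1 else 0) + refGo maxLength 0 cs

theorem pvLetter_isspace {c : Char} (h : pvLetter c = true) : PySem.Chars.isspace c = false := by
  simp only [pvLetter, Bool.or_eq_true, Bool.and_eq_true, decide_eq_true_eq, Char.le_def,
    UInt32.le_iff_toNat_le] at h
  by_contra hs
  rw [Bool.not_eq_false] at hs
  simp only [PySem.Chars.isspace, Char.toNat, Bool.or_eq_true, Bool.and_eq_true,
    decide_eq_true_eq] at hs
  have e1 : 'a'.val.toNat = 97 := rfl
  have e2 : 'z'.val.toNat = 122 := rfl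
  have e3 : 'A'.val.toNat = 65 := rfl
  have e4 : 'Z'.val.toNat = 90 := rfl
  rw [e1, e2] at h
  rw [e3, e4] at h
  omega

theorem foldl_snoc_map (f : Char → Char) (cs : List Char) (init : List Char) :
    cs.foldl (fun acc c => acc ++ [f c]) init = init ++ cs.map f := by
  induction cs generalizing init with
  | nil => simp
  | cons c cs ih => simp [List.foldl, ih]

def okW (maxLength : Int) (w : List Char) : Bool := decide ((w.length : Int) ≤ maxLength)

theorem foldl_count (maxLength : Int) (ws : List (List Char)) (n : Int) :
    ws.foldl (fun count w => if (w.length : Int) ≤ maxLength then count + 1 else count) n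
      = n + ((ws.filter (okW maxLength)).length : Int) := by
  induction ws generalizing n with
  | nil => simp
  | cons w ws ih =>
    simp only [List.foldl, List.filter_cons, okW]
    by_cases h : (w.length : Int) ≤ maxLength
    · simp only [h, if_pos, decide_true, ih, List.length_cons]
      push_cast; ring
    · simp only [h, if_neg, if_false, decide_false, ih, Bool.false_eq_true, not_false_iff]

-- A's split₀.go on a letters/space list, related to refGo
theorem split_go_count (maxLength : Int) (cs : List Char) :
    ∀ (cur : List Char) (acc : List (List Char)),
    (((PySem.Chars.split₀.go (cs.map (fun c => if pvLetter c then c else ' ')) cur acc).filter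
        (okW maxLength)).length : Int)
      = ((acc.filter (okW maxLength)).length : Int) + refGo maxLength cur.length cs := by
  induction cs with
  | nil =>
    intro cur acc
    simp only [List.map_nil, PySem.Chars.split₀.go, refGo]
    cases cur with
    | nil => simp [List.filter_reverse]
    | cons a l =>
      simp only [List.isEmpty_cons, Bool.false_eq_true, if_false, List.filter_reverse,
        List.length_reverse, List.filter_cons, List.length_cons, okW, List.length_reverse]
      by_cases h : ((l.length : Int) < maxLength)
      · simp [h]
      · simp [h]
  | cons c cs ih =>
    intro cur acc
    simp only [List.map_cons]
    by_cases hl : pvLetter c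
    · rw [if_pos hl]
      simp only [PySem.Chars.split₀.go, pvLetter_isspace hl, Bool.false_eq_true, if_false]
      rw [ih (c :: cur) acc]
      simp [refGo, hl]
    · rw [if_neg hl]
      have hsp : PySem.Chars.isspace ' ' = true := by decide
      simp only [PySem.Chars.split₀.go, hsp, if_pos]
      cases cur with
      | nil =>
        simp only [List.isEmpty_nil, if_pos]
        rw [ih [] acc]
        simp [refGo, hl]
      | cons a l =>
        simp only [List.isEmpty_cons, Bool.false_eq_true, if_false]
        rw [ih [] (((a :: l).reverse) :: acc)]
        simp only [List.filter_cons, okW, List.length_reverse, List.length_nil, refGo, hl,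
          Bool.false_eq_true, if_false, List.length_cons]
        by_cases h : ((l.length : Int) < maxLength)
        · simp [h]
          ring
        · simp [h]

-- B's fold related to refGo
theorem b_fold (maxLength : Int) (cs : List Char) :
    ∀ (count : Int) (r : Nat),
    (let s := cs.foldl
        (fun (s : Int × Int) c =>
          if pvLetter c then (s.1, s.2 + 1)
          else if s.2 > 0 then (if s.2 ≤ maxLength then s.1 + 1 else s.1, 0) else s) (count, (r : Int));
     if s.2 > 0 && s.2 ≤ maxLength then s.1 + 1 else s.1)
      = count + refGo maxLength r cs := by
  induction cs with
  | nil =>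
    intro count r
    simp only [List.foldl, refGo]
    by_cases h1 : 0 < r
    · by_cases h2 : (r : Int) ≤ maxLength
      · have hb : (((r : Int) > 0 : Bool) && ((r : Int) ≤ maxLength : Bool)) = true := by
          simp only [Bool.and_eq_true, decide_eq_true_eq]
          constructor
          · exact_mod_cast h1
          · exact h2
        simp [hb, h1, h2]
      · have hb : (((r : Int) > 0 : Bool) && ((r : Int) ≤ maxLength : Bool)) = false := by
          simp [h2]
        simp [hb, h1, h2]
    · have hr : r = 0 := by omega
      subst hr; simp
  | cons c cs ih =>
    intro count r
    simp only [List.foldl, refGo]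
    by_cases hl : pvLetter c
    · simp only [hl, if_pos]
      have hcast : ((r : Int) + 1) = ((r + 1 : Nat) : Int) := by push_cast; ring
      rw [hcast, ih count (r + 1)]
    · simp only [hl, Bool.false_eq_true, if_false]
      by_cases h1 : (r : Int) > 0
      · have h1' : 0 < r := by exact_mod_cast h1
        simp only [h1, if_pos]
        by_cases h2 : (r : Int) ≤ maxLength
        · simp only [h2, if_pos]
          have h0 := ih (count + 1) 0
          simp only [Nat.cast_zero] at h0
          rw [h0]
          simp [hl, h1', h2]; ring
        · rw [if_neg h2]
          have h0 := ih count 0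
          simp only [Nat.cast_zero] at h0
          rw [h0]
          simp [hl, h1', h2]
      · have hr : r = 0 := by omega
        subst hr
        simp only [Nat.cast_zero] at h1 ⊢
        rw [if_neg h1]
        have h0 := ih count 0
        simp only [Nat.cast_zero] at h0
        rw [h0]
        simp [hl]

-- ===== VERDICT (by name: the statement is the Claim_ definition above) =====
theorem timedReading_spec : Claim_equal_timedReading := by
  intro maxLength text _
  unfold Spec_timedReading timedReading timedReading_alt
  have hfun : (fun (acc : List Char) c => if pvLetter c then acc ++ [c] else acc ++ [' '])
      = (fun (acc : List Char) c => acc ++ [if pvLetter c then c else ' ']) := by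
    funext acc c
    by_cases h : pvLetter c <;> simp [h]
  rw [hfun, foldl_snoc_map, List.nil_append]
  simp only [PySem.Chars.split₀]
  rw [foldl_count]
  have hsplit := split_go_count maxLength text.toList [] []
  simp only [List.filter_nil, List.length_nil, Nat.cast_zero, zero_add] at hsplit
  rw [hsplit]
  have hb := b_fold maxLength text.toList 0 0
  simp only [Nat.cast_zero] at hb
  rw [hb]
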